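-- pv_equiv track=rewrite | github.com/circuitpotato/truth-table-solver | truth_table_solver_2.0.py | replace_letters_with_lowercase
-- ===== SOURCE A (Python) =====
-- def replace_letters_with_lowercase(input_string):
--     replaced_letters = []
--     for char in ['O', 'S', 'I', 'N', 'E', 'Q']:
--         if char in input_string:
--             replaced_letters.append(char)
--             input_string = input_string.replace(char, char.lower())
--
--     replaced_letters = [char.lower() for char in replaced_letters]
--     return input_string, replaced_letters
-- ===== SOURCE B (Python) =====
-- def replace_letters_with_lowercase(input_string):
--     specials = {'O', 'S', 'I', 'N', 'E', 'Q'}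
--     seen = set()
--     out = []
--     for ch in input_string:
--         if ch in specials:
--             out.append(ch.lower())
--             seen.add(ch)
--         else:
--             out.append(ch)
--     replaced = [c for c in 'osineq' if c.upper() in seen]
--     return ''.join(out), replaced
-- ===== Notes on version B (the rewrite author's own statement) =====
-- stated objective: simpler
-- what changed: A makes six sequential full-string replace passes (one per special letter); B makes one pass over the string, lowercasing special characters on the fly while recording which ones were seen, then filters the fixed lowercase list to preserve A's output order.
import Mathlib
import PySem

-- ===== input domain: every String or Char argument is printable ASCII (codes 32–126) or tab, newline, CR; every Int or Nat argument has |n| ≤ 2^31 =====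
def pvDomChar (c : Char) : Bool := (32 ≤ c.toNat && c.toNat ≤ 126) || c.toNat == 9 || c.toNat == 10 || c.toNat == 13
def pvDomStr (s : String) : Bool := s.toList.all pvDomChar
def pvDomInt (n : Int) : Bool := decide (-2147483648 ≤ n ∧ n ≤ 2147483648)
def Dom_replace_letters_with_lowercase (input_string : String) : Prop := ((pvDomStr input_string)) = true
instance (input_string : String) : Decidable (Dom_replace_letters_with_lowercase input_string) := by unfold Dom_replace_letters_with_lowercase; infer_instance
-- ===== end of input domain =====

-- B replaces A's six sequential full-string replace passes (one per special letter) by a single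
-- pass over the string that lowercases special characters on the fly; same return value.

-- ===== PORT A =====
-- the literal list ['O', 'S', 'I', 'N', 'E', 'Q'] A loops over (elements are 1-char Python strs)
def pvSpecialsA : List String := ["O", "S", "I", "N", "E", "Q"]

def replace_letters_with_lowercase (input_string : String) : String × List String :=
  let st := pvSpecialsA.foldl
    (fun (st : String × List String) ch =>
      if PySem.Str.isIn ch st.1 then
        (PySem.Str.replace st.1 ch (PySem.Str.lower ch), st.2 ++ [ch])
      else st)
    (input_string, [])
  (st.1, st.2.map PySem.Str.lower)

-- ===== PORT B =====
-- B's set literal {'O','S','I','N','E','Q'}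
def pvSpecialsB : PySem.Set Char := PySem.Set.ofList ['O', 'S', 'I', 'N', 'E', 'Q']

def replace_letters_with_lowercase_alt (input_string : String) : String × List String :=
  let st := input_string.toList.foldl
    (fun (st : List String × PySem.Set Char) ch =>
      if pvSpecialsB.contains ch then
        (st.1 ++ [String.ofList [PySem.Chars.lowerChar ch]], st.2.add ch)
      else (st.1 ++ [String.ofList [ch]], st.2))
    ([], PySem.Set.empty)
  (PySem.Str.join "" st.1,
   (['o', 's', 'i', 'n', 'e', 'q'].filter
      (fun c => st.2.contains (PySem.Chars.upperChar c))).map (fun c => String.ofList [c]))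

-- ===== PRECONDITION & SPEC =====
def Spec_replace_letters_with_lowercase (input_string : String) (out : String × List String) : Prop := out = replace_letters_with_lowercase_alt input_string
instance (input_string : String) (out : String × List String) : Decidable (Spec_replace_letters_with_lowercase input_string out) := by unfold Spec_replace_letters_with_lowercase; infer_instance

-- ===== CLAIM (what is proved, stated in full; the proofs are below) =====
def Claim_equal_replace_letters_with_lowercase : Prop := ∀ (input_string : String), Dom_replace_letters_with_lowercase input_string → Spec_replace_letters_with_lowercase input_string (replace_letters_with_lowercase input_string)

-- ===== LEMMAS AND PROOFS =====

theorem pv_replace_go_single (c d : Char) :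
    ∀ (l : List Char) (fuel : Nat) (acc : List Char), l.length ≤ fuel →
      PySem.Chars.replace.go [c] [d] fuel l acc
        = acc.reverse ++ l.map (fun x => if x = c then d else x) := by
  intro l
  induction l with
  | nil =>
    intro fuel acc h
    cases fuel <;> simp [PySem.Chars.replace.go]
  | cons x t ih =>
    intro fuel acc h
    cases fuel with
    | zero => simp at h
    | succ f =>
      simp only [PySem.Chars.replace.go]
      have hp : ([c].isPrefixOf (x :: t)) = (c == x) := by simp [List.isPrefixOf]
      rw [hp]
      by_cases hx : x = c
      · subst hx
        rw [if_pos (by simp), show List.drop [x].length (x :: t) = t from rfl,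
          show [d].reverse ++ acc = d :: acc from rfl,
          ih f (d :: acc) (by simpa using h)]
        simp
      · rw [if_neg (by simp [beq_iff_eq]; exact fun hh => hx hh.symm),
          ih f (x :: acc) (by simpa using h)]
        simp [hx]

theorem pv_replace_single (c d : Char) (l : List Char) :
    PySem.Chars.replace l [c] [d] = l.map (fun x => if x = c then d else x) := by
  simp [PySem.Chars.replace, pv_replace_go_single c d l l.length [] le_rfl]

theorem pv_mem_map_swap (c d c' : Char) (l : List Char) (h1 : c' ≠ c) (h2 : c' ≠ d) :
    (c' ∈ l.map (fun x => if x = c then d else x)) ↔ c' ∈ l := by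
  simp only [List.mem_map]
  constructor
  · rintro ⟨x, hx, hfx⟩
    by_cases hxc : x = c
    · simp [hxc] at hfx; exact absurd hfx.symm h2
    · simp [hxc] at hfx; rwa [hfx] at hx
  · intro h
    exact ⟨c', h, by simp [h1]⟩

theorem pv_infix_singleton (c : Char) (l : List Char) : [c] <:+: l ↔ c ∈ l := by
  constructor
  · intro h; exact h.subset (by simp)
  · intro h
    obtain ⟨s, t, rfl⟩ := List.append_of_mem h
    exact ⟨s, t, by simp⟩

theorem pv_isIn_singleton (c : Char) (l : List Char) :
    PySem.Str.isIn (String.ofList [c]) (String.ofList l) = decide (c ∈ l) := by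
  have h := PySem.Str.isIn_iff_infix (String.ofList [c]) (String.ofList l)
  simp [pv_infix_singleton] at h
  by_cases hc : c ∈ l <;> simp [hc] at h ⊢ <;> exact h

theorem pv_lower_singleton (c : Char) :
    PySem.Str.lower (String.ofList [c]) = String.ofList [PySem.Chars.lowerChar c] := by
  simp [PySem.Str.lower, PySem.Chars.lower]

theorem pv_foldB (s : List Char) :
    ∀ (out : List String) (seen : PySem.Set Char),
      s.foldl
        (fun (st : List String × PySem.Set Char) ch =>
          if pvSpecialsB.contains ch then
            (st.1 ++ [String.ofList [PySem.Chars.lowerChar ch]], st.2.add ch)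
          else (st.1 ++ [String.ofList [ch]], st.2))
        (out, seen)
      = (out ++ s.map (fun c =>
            String.ofList [if pvSpecialsB.contains c then PySem.Chars.lowerChar c else c]),
         (s.filter (fun c => pvSpecialsB.contains c)).foldl PySem.Set.add seen) := by
  induction s with
  | nil => simp
  | cons x t ih =>
    intro out seen
    by_cases hx : pvSpecialsB.contains x = true
    · simp only [List.foldl_cons, ih, List.filter_cons, hx]
      simp only [PySem.Set.contains] at hx
      simp at hx
      simp [hx]
    · simp only [List.foldl_cons, ih, List.filter_cons, hx]
      simp only [PySem.Set.contains] at hx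
      simp at hx
      simp [hx]

theorem pv_contains_foldl_add (xs : List Char) :
    ∀ (seen : PySem.Set Char) (x : Char),
      (xs.foldl PySem.Set.add seen).contains x = (seen.contains x || xs.contains x) := by
  induction xs with
  | nil => simp
  | cons y t ih =>
    intro seen x
    rw [List.foldl_cons, ih]
    by_cases h1 : x ∈ seen <;> by_cases h2 : x = y <;> by_cases h3 : (y : Char) ∈ seen <;>
      simp_all [PySem.Set.add, PySem.Set.contains]

theorem pv_foldA (L : List Char) :
    ∀ (s : List Char) (acc : List String), L.Nodup →
      (∀ c ∈ L, ∀ c' ∈ L, PySem.Chars.lowerChar c ≠ c') →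
      (L.map (fun c => String.ofList [c])).foldl
        (fun (st : String × List String) ch =>
          if PySem.Str.isIn ch st.1 then
            (PySem.Str.replace st.1 ch (PySem.Str.lower ch), st.2 ++ [ch])
          else st)
        (String.ofList s, acc)
      = (String.ofList (s.map (fun x => if x ∈ L then PySem.Chars.lowerChar x else x)),
         acc ++ (L.filter (fun c => decide (c ∈ s))).map (fun c => String.ofList [c])) := by
  induction L with
  | nil => intro s acc _ _; simp
  | cons c T ih =>
    intro s acc hnd hlow
    have hndT : T.Nodup := hnd.of_cons
    have hlowT : ∀ a ∈ T, ∀ a' ∈ T, PySem.Chars.lowerChar a ≠ a' := fun a ha a' ha' =>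
      hlow a (List.mem_cons_of_mem _ ha) a' (List.mem_cons_of_mem _ ha')
    have hcT : c ∉ T := (List.nodup_cons.1 hnd).1
    rw [List.map_cons, List.foldl_cons]
    by_cases hc : c ∈ s
    · rw [if_pos (by rw [pv_isIn_singleton]; simpa using hc)]
      rw [pv_lower_singleton]
      have hrep : PySem.Str.replace (String.ofList s) (String.ofList [c])
          (String.ofList [PySem.Chars.lowerChar c])
          = String.ofList (s.map (fun x => if x = c then PySem.Chars.lowerChar c else x)) := by
        simp [PySem.Str.replace, pv_replace_single]
      rw [hrep, ih _ _ hndT hlowT]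
      rw [Prod.mk.injEq]
      refine ⟨?_, ?_⟩
      · -- first components
        rw [List.map_map]
        congr 1
        apply List.map_congr_left
        intro x hx
        by_cases hxc : x = c
        · subst hxc
          simp only [Function.comp_apply]
          have : PySem.Chars.lowerChar x ∉ T := fun hmem =>
            hlow x (by simp) (PySem.Chars.lowerChar x) (by simp [hmem]) rfl
          simp [this]
        · simp only [Function.comp_apply, if_neg hxc]
          by_cases hxT : x ∈ T
          · simp [hxT]
          · simp [hxT, hxc]
      · -- second components
        rw [List.filter_cons, if_pos (by simpa using hc), List.map_cons, List.append_assoc]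
        rw [List.singleton_append]
        congr 3
        apply List.filter_congr
        intro a ha
        have ha1 : a ≠ c := fun h => hcT (h ▸ ha)
        have ha2 : a ≠ PySem.Chars.lowerChar c :=
          fun h => (hlow c (by simp) a (by simp [ha])) h.symm
        rw [decide_eq_decide]
        exact pv_mem_map_swap c (PySem.Chars.lowerChar c) a s ha1 ha2
    · rw [if_neg (by rw [pv_isIn_singleton]; simpa using hc)]
      rw [ih _ _ hndT hlowT]
      rw [List.filter_cons, if_neg (by simpa using hc)]
      congr 2
      apply List.map_congr_left
      intro x hx
      have hxc : x ≠ c := fun h => hc (h ▸ hx)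
      by_cases hxT : x ∈ T
      · simp [hxT]
      · simp [hxT, hxc]

set_option maxRecDepth 10000 in
theorem pv_final (s : String) :
    replace_letters_with_lowercase s = replace_letters_with_lowercase_alt s := by
  have hBspec : ∀ x : Char, pvSpecialsB.contains x = true ↔ x ∈ (['O', 'S', 'I', 'N', 'E', 'Q'] : List Char) := by
    intro x
    rw [pvSpecialsB, PySem.Set.contains_iff, PySem.Set.mem_ofList]
  unfold replace_letters_with_lowercase replace_letters_with_lowercase_alt
  rw [pv_foldB]
  have hA : pvSpecialsA
      = (['O', 'S', 'I', 'N', 'E', 'Q'].map (fun c => String.ofList [c])) := by decide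
  rw [show (s, ([] : List String)) = (String.ofList s.toList, ([] : List String)) by
        rw [String.ofList_toList],
      hA, pv_foldA ['O', 'S', 'I', 'N', 'E', 'Q'] s.toList [] (by decide)
        (by
          simp only [List.mem_cons, List.not_mem_nil, or_false]
          rintro c (rfl | rfl | rfl | rfl | rfl | rfl) c' (rfl | rfl | rfl | rfl | rfl | rfl) <;>
            simp [PySem.Chars.lowerChar] <;> decide)]
  rw [Prod.mk.injEq]
  constructor
  · -- strings
    simp only [PySem.Str.join]
    have hmm : List.map String.toList
        (List.map (fun c => String.ofList
          [if pvSpecialsB.contains c = true then PySem.Chars.lowerChar c else c]) s.toList)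
        = List.map (fun c => [c])
            (List.map (fun c => if pvSpecialsB.contains c = true then PySem.Chars.lowerChar c else c) s.toList) := by
      rw [List.map_map, List.map_map]
      apply List.map_congr_left; intro x _; simp
    rw [List.nil_append, hmm, show ("" : String).toList = [] from rfl,
      PySem.Chars.join_nil_singletons]
    congr 1
    apply List.map_congr_left
    intro x _
    by_cases hx : x ∈ (['O', 'S', 'I', 'N', 'E', 'Q'] : List Char)
    · rw [if_pos hx, if_pos ((hBspec x).2 hx)]
    · rw [if_neg hx, if_neg (fun h => hx ((hBspec x).1 h))]
  · -- replaced lists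
    simp only [List.nil_append]
    have hseen : ∀ u : Char,
        ((List.filter (fun c => pvSpecialsB.contains c) s.toList).foldl PySem.Set.add
          PySem.Set.empty).contains u
        = List.contains (List.filter (fun c => pvSpecialsB.contains c) s.toList) u := by
      intro u
      rw [pv_contains_foldl_add]
      simp [PySem.Set.empty, PySem.Set.contains]
    simp only [hseen]
    by_cases h1 : 'O' ∈ s.toList <;> by_cases h2 : 'S' ∈ s.toList <;>
      by_cases h3 : 'I' ∈ s.toList <;> by_cases h4 : 'N' ∈ s.toList <;>
      by_cases h5 : 'E' ∈ s.toList <;> by_cases h6 : 'Q' ∈ s.toList <;>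
      simp [List.filter, List.mem_filter, h1, h2, h3, h4, h5, h6,
        show PySem.Chars.upperChar 'o' = 'O' from rfl,
        show PySem.Chars.upperChar 's' = 'S' from rfl,
        show PySem.Chars.upperChar 'i' = 'I' from rfl,
        show PySem.Chars.upperChar 'n' = 'N' from rfl,
        show PySem.Chars.upperChar 'e' = 'E' from rfl,
        show PySem.Chars.upperChar 'q' = 'Q' from rfl] <;>
      decide

-- ===== VERDICT (by name: the statement is the Claim_ definition above) =====
theorem replace_letters_with_lowercase_spec : Claim_equal_replace_letters_with_lowercase := by
  intro input_string _
  unfold Spec_replace_letters_with_lowercase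
  exact pv_final input_string
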